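-- pv_equiv track=rewrite | github.com/nickderobertis/py-file-conf | pyfileconf/config/logic/load.py | _split_lines_into_import_and_assignment
-- ===== SOURCE A (Python) =====
-- from typing import Tuple, List, Union, Sequence
-- from copy import deepcopy
--
-- ListOfStrs = List[str]
--
-- def _split_lines_into_import_and_assignment(lines: ListOfStrs, strip_lines=True) -> Tuple[ListOfStrs, ListOfStrs]:
--     # TODO [#2]: deal with later imports
--     #
--     # Imports can currently only be read from the top of the file
--
--     # TODO [#3]: deal with use of import other than the word import
--
--     import_section = []
--     assignment_section = []
--     # We can have three cases for the following two booleans: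
--     # The file starts in the import section
--     # Then, we enter the whitespace section between import and assignments. Still consider this the import section.
--     # Finally, once text is detected again after import section,
--     # assignment section starts (in_import_section=False)
--     in_import_section = True
--     for i, line in enumerate(lines):
--
--         if strip_lines:
--             line = line.strip('\n')
--
--         # Handle import section and add whitespace below import section
--         if in_import_section:
--             if 'import' in line or _is_whitespace_line(line):
--                 import_section.append(line)
--             else:
--                 in_import_section = False  # no longer dealing with imports, must have assignment line
--
--         # Assignment section, just output
--         if not in_import_section:
--             assignment_section.append(line)
--
--     # Import section was handled as both import section and following whitespace. Strip following whitespace.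
--     import_section = _strip_whitespace_lines_from_end_of_lines(import_section)
--
--     return import_section, assignment_section
--
-- def _is_whitespace_line(line: str) -> bool:
--     return line.strip() == ''
--
-- def _strip_whitespace_lines_from_end_of_lines(lines: List[str]) -> List[str]:
--
--     # Handle empty list
--     if lines == []:
--         return []
--
--     reversed_lines = deepcopy(lines)
--     reversed_lines.reverse()
--
--     # starting from end first. Discard all lines until non-whitespace is found
--     for line_index, line in enumerate(reversed_lines):
--         if not _is_whitespace_line(line):
--             break
--
--     output_lines = reversed_lines[line_index:]
--     output_lines.reverse() # back to first first
--
--     return output_lines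
-- ===== SOURCE B (Python) =====
-- def _split_lines_into_import_and_assignment(lines, strip_lines=True):
--     # Single right-to-left pass: imp_r holds the current keep-run up to its last
--     # import line (reversed), pend_r the trailing whitespace of that run (reversed,
--     # i.e. the part A's second pass would trim), asgn_r the assignment suffix
--     # (reversed). A non-keep line flushes everything to its right into asgn_r.
--     imp_r, pend_r, asgn_r = [], [], []
--     for line in reversed(lines):
--         h = line.strip('\n') if strip_lines else line
--         if 'import' in h:
--             imp_r.append(h)
--         elif h.strip() == '':
--             (imp_r if imp_r else pend_r).append(h)
--         else:
--             asgn_r.extend(pend_r)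
--             asgn_r.extend(imp_r)
--             asgn_r.append(h)
--             imp_r, pend_r = [], []
--     return imp_r[::-1], asgn_r[::-1]
-- ===== Notes on version B (the rewrite author's own statement) =====
-- stated objective: alternative
-- what changed: Replaces A's two-stage left-to-right flag loop plus a separate reverse/deepcopy/enumerate trailing-whitespace-trim pass by a single right-to-left pass with three accumulators (confirmed imports, pending trailing whitespace, assignment suffix) in which the trailing trim happens implicitly and any non-keep line flushes everything to its right into the assignment section.
-- intended difference: When the leading run of whitespace-only lines is nonempty and the first non-whitespace line (if any) does not contain 'import', A's trailing-whitespace stripper leaves one whitespace line in the import section (its enumerate index is left at len-1 when the prefix is all whitespace), e.g. A returns ([''], []) on [''], while B returns ([], []), the intended fully trimmed result. — e.g. on _split_lines_into_import_and_assignment([""], true): A returns ([""], []), B returns ([], [])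
import Mathlib
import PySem

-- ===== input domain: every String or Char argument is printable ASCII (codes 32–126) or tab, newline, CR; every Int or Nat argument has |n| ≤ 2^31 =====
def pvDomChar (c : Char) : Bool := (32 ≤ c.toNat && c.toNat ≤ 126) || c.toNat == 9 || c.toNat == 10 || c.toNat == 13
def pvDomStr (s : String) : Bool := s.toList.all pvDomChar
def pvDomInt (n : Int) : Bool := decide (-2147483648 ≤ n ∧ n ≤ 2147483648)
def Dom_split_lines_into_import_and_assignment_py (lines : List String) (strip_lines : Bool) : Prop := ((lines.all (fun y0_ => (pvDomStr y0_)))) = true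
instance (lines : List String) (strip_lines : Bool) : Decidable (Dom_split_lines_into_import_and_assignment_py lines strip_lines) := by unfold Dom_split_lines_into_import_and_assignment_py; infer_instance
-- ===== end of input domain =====

-- B replaces A's left-to-right flag loop plus separate reverse/enumerate trailing-trim pass by ONE
-- right-to-left pass with three accumulators in which the trailing trim is implicit (objective:
-- alternative). Neither version mutates its argument observably; only return values are compared.

-- shared helpers (both Pythons use the same per-line tests)
-- _is_whitespace_line(line): line.strip() == ''
def pvIsWs (s : String) : Bool := PySem.Str.strip s == ""
-- 'import' in line or _is_whitespace_line(line)
def pvKeep (s : String) : Bool := PySem.Str.isIn "import" s || pvIsWs s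
-- per-line processing: line.strip('\n') when strip_lines
def pvProc (strip_lines : Bool) (s : String) : String :=
  if strip_lines then PySem.Str.stripChars s "\n" else s

-- ===== PORT A =====
-- loop body of A: state = (import_section, assignment_section, in_import_section)
def pvStepA (strip_lines : Bool) (st : List String × List String × Bool) (line : String) : List String × List String × Bool :=
  let line := pvProc strip_lines line
  if st.2.2 then
    if pvKeep line then (st.1 ++ [line], st.2.1, true)
    else (st.1, st.2.1 ++ [line], false)
  else (st.1, st.2.1 ++ [line], false)

-- the enumerate loop of _strip_whitespace_lines_from_end_of_lines: line_index at break
-- (first non-whitespace index), or len-1 when the loop runs off the end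
def pvFindBreak : List String → Nat
  | [] => 0
  | x :: xs => if pvIsWs x = false then 0 else if xs.isEmpty then 0 else pvFindBreak xs + 1

def pvStripEndA (lines : List String) : List String :=
  if lines = [] then []
  else
    let reversed := lines.reverse
    ((reversed.drop (pvFindBreak reversed)).reverse)

def split_lines_into_import_and_assignment_py (lines : List String) (strip_lines : Bool) : List String × List String :=
  let st := lines.foldl (pvStepA strip_lines) ([], [], true)
  (pvStripEndA st.1, st.2.1)

-- ===== PORT B =====
-- loop body of B: state = (imp_r, pend_r, asgn_r), each in scan (= reversed-original) order
def pvStepB (strip_lines : Bool) (st : List String × List String × List String) (line : String) : List String × List String × List String :=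
  let h := pvProc strip_lines line
  if PySem.Str.isIn "import" h then (st.1 ++ [h], st.2.1, st.2.2)
  else if pvIsWs h then
    if st.1.isEmpty then (st.1, st.2.1 ++ [h], st.2.2)
    else (st.1 ++ [h], st.2.1, st.2.2)
  else ([], [], st.2.2 ++ st.2.1 ++ st.1 ++ [h])

def split_lines_into_import_and_assignment_py_alt (lines : List String) (strip_lines : Bool) : List String × List String :=
  let st := lines.reverse.foldl (pvStepB strip_lines) ([], [], [])
  (st.1.reverse, st.2.2.reverse)

-- ===== PRECONDITION & SPEC =====
-- helpers for the change region (input shape only; both tests are invariant under the optional '\n'-strip)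
def pvWsLine (s : String) : Bool := s.toList.all PySem.Chars.isspace
def pvHasImport (s : String) : Bool := PySem.Chars.isIn "import".toList s.toList

-- When the leading run of whitespace-only lines is nonempty and the first non-whitespace line (if any)
-- does not contain 'import', A's trailing-strip leaves one whitespace line in the import section
-- (leftover loop index len-1); B returns the intended fully trimmed (empty) import section there.
def D_split_lines_into_import_and_assignment_py (lines : List String) (strip_lines : Bool) : Prop :=
  lines.takeWhile pvWsLine ≠ [] ∧
  pvHasImport ((lines.dropWhile pvWsLine).head?.getD "") = false
instance (lines : List String) (strip_lines : Bool) : Decidable (D_split_lines_into_import_and_assignment_py lines strip_lines) := by unfold D_split_lines_into_import_and_assignment_py; infer_instance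
def Spec_split_lines_into_import_and_assignment_py (lines : List String) (strip_lines : Bool) (out : List String × List String) : Prop := ¬ D_split_lines_into_import_and_assignment_py lines strip_lines → out = split_lines_into_import_and_assignment_py_alt lines strip_lines
instance (lines : List String) (strip_lines : Bool) (out : List String × List String) : Decidable (Spec_split_lines_into_import_and_assignment_py lines strip_lines out) := by unfold Spec_split_lines_into_import_and_assignment_py; infer_instance

def pvDiffWitness_split_lines_into_import_and_assignment_py : List String × Bool := ([""], true)
def pvDiffWitnessOut_split_lines_into_import_and_assignment_py : (List String × List String) × (List String × List String) := (([""], []), ([], []))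

-- ===== CLAIM (what is proved, stated in full; the proofs are below) =====
def Claim_unchanged_split_lines_into_import_and_assignment_py : Prop := ∀ (lines : List String) (strip_lines : Bool), Dom_split_lines_into_import_and_assignment_py lines strip_lines → Spec_split_lines_into_import_and_assignment_py lines strip_lines (split_lines_into_import_and_assignment_py lines strip_lines)
def Claim_changed_split_lines_into_import_and_assignment_py : Prop := Dom_split_lines_into_import_and_assignment_py (pvDiffWitness_split_lines_into_import_and_assignment_py.1) (pvDiffWitness_split_lines_into_import_and_assignment_py.2) ∧ D_split_lines_into_import_and_assignment_py (pvDiffWitness_split_lines_into_import_and_assignment_py.1) (pvDiffWitness_split_lines_into_import_and_assignment_py.2) ∧ split_lines_into_import_and_assignment_py (pvDiffWitness_split_lines_into_import_and_assignment_py.1) (pvDiffWitness_split_lines_into_import_and_assignment_py.2) = pvDiffWitnessOut_split_lines_into_import_and_assignment_py.1 ∧ split_lines_into_import_and_assignment_py_alt (pvDiffWitness_split_lines_into_import_and_assignment_py.1) (pvDiffWitness_split_lines_into_import_and_assignment_py.2) = pvDiffWitnessOut_split_lines_into_import_and_assignment_py.2 ∧ pvDiffWitnessOut_split_lines_into_import_and_assignment_py.1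 ≠ pvDiffWitnessOut_split_lines_into_import_and_assignment_py.2
def Claim_exact_split_lines_into_import_and_assignment_py : Prop := ∀ (lines : List String) (strip_lines : Bool), Dom_split_lines_into_import_and_assignment_py lines strip_lines → D_split_lines_into_import_and_assignment_py lines strip_lines → split_lines_into_import_and_assignment_py lines strip_lines ≠ split_lines_into_import_and_assignment_py_alt lines strip_lines

-- ===== LEMMAS AND PROOFS =====

lemma pvFoldA_false (strip : Bool) (ls : List String) (imp asgn : List String) :
    ls.foldl (pvStepA strip) (imp, asgn, false) = (imp, asgn ++ ls.map (pvProc strip), false) := by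
  induction ls generalizing asgn with
  | nil => simp
  | cons x xs ih => simp [pvStepA, ih]

lemma pvFoldA_true (strip : Bool) (ls : List String) (imp : List String) :
    ls.foldl (pvStepA strip) (imp, [], true) =
      (imp ++ (ls.map (pvProc strip)).takeWhile pvKeep,
       (ls.map (pvProc strip)).dropWhile pvKeep,
       ((ls.map (pvProc strip)).dropWhile pvKeep).isEmpty) := by
  induction ls generalizing imp with
  | nil => simp
  | cons x xs ih =>
    by_cases h : pvKeep (pvProc strip x) = true
    · simp [pvStepA, h, ih]
    · simp only [Bool.not_eq_true] at h
      simp [pvStepA, h, pvFoldA_false]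

lemma pvFindBreak_drop (r : List String) (h : ∃ x ∈ r, pvIsWs x = false) :
    r.drop (pvFindBreak r) = r.dropWhile pvIsWs := by
  induction r with
  | nil => simp
  | cons x xs ih =>
    by_cases hx : pvIsWs x = false
    · simp [pvFindBreak, hx]
    · simp only [Bool.not_eq_false] at hx
      have hxs : ∃ y ∈ xs, pvIsWs y = false := by
        rcases h with ⟨y, hy, hyw⟩
        rcases List.mem_cons.mp hy with rfl | hy
        · simp [hx] at hyw
        · exact ⟨y, hy, hyw⟩
      have hne : xs ≠ [] := by rcases hxs with ⟨y, hy, _⟩; exact List.ne_nil_of_mem hy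
      simp [pvFindBreak, hx, List.isEmpty_iff, hne, ih hxs]

lemma pvFindBreak_lt (r : List String) (h : r ≠ []) : pvFindBreak r < r.length := by
  induction r with
  | nil => exact absurd rfl h
  | cons x xs ih =>
    by_cases hx : pvIsWs x = false
    · simp [pvFindBreak, hx]
    · simp only [Bool.not_eq_false] at hx
      rcases List.eq_nil_or_concat' xs with rfl | ⟨_, _, _⟩
      · simp [pvFindBreak, hx]
      · have hne : xs ≠ [] := by simp_all
        have := ih hne
        simp [pvFindBreak, hx, List.isEmpty_iff, hne]
        omega

-- A's trim equals the trimmed closed form whenever the list is empty or has a non-whitespace line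
lemma pvStripEnd_agree (p : List String) (h : p = [] ∨ ∃ x ∈ p, pvIsWs x = false) :
    pvStripEndA p = (p.reverse.dropWhile pvIsWs).reverse := by
  rcases h with rfl | h
  · simp [pvStripEndA]
  · have hne : p ≠ [] := by rcases h with ⟨y, hy, _⟩; exact List.ne_nil_of_mem hy
    have hr : ∃ x ∈ p.reverse, pvIsWs x = false := by
      rcases h with ⟨y, hy, hyw⟩; exact ⟨y, List.mem_reverse.mpr hy, hyw⟩
    simp [pvStripEndA, hne, pvFindBreak_drop p.reverse hr]

-- port A in closed form over processed = map (pvProc strip) lines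
lemma pvA_eq (lines : List String) (strip : Bool) :
    split_lines_into_import_and_assignment_py lines strip =
      (pvStripEndA ((lines.map (pvProc strip)).takeWhile pvKeep),
       (lines.map (pvProc strip)).dropWhile pvKeep) := by
  simp [split_lines_into_import_and_assignment_py, pvFoldA_true]

-- an occurrence of a pattern with no stripped character survives dropWhile
lemma pvInfix_dropWhile {p : Char → Bool} {pat l : List Char} (hall : ∀ c ∈ pat, p c = false)
    (h : pat <:+: l) : pat <:+: l.dropWhile p := by
  induction l with
  | nil => simpa using h
  | cons x xs ih =>
    cases hx : p x with
    | false => simpa [hx] using h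
    | true =>
      simp only [List.dropWhile_cons, hx, if_pos]
      rcases List.infix_cons_iff.mp h with hpre | hinf
      · cases pat with
        | nil => exact List.nil_infix
        | cons i is =>
          have hix : i = x := (List.cons_prefix_cons.mp hpre).1
          have := hall i (List.mem_cons_self)
          rw [hix, hx] at this
          cases this
      · exact ih hinf

lemma pvAll_dropWhile {p q : Char → Bool} (himp : ∀ c, p c = true → q c = true) (l : List Char) :
    (l.dropWhile p).all q = l.all q := by
  induction l with
  | nil => rfl
  | cons x xs ih =>
    cases hx : p x
    · simp [hx]
    · simp [hx, ih, himp x hx]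

lemma pvStrip_empty_iff (l : List Char) :
    PySem.Chars.strip l = [] ↔ l.all PySem.Chars.isspace = true := by
  simp only [PySem.Chars.strip, PySem.Chars.rstrip, PySem.Chars.lstrip]
  rw [List.reverse_eq_nil_iff, List.dropWhile_eq_nil_iff]
  constructor
  · intro h
    have h1 : (List.dropWhile PySem.Chars.isspace l).all PySem.Chars.isspace = true := by
      rw [← List.all_reverse]
      simpa [List.all_eq_true] using h
    rwa [pvAll_dropWhile (fun _ hc => hc) l] at h1
  · intro h x hx
    have hx' : x ∈ l := (List.dropWhile_sublist (l := l) (p := PySem.Chars.isspace)).subset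
      (List.mem_reverse.mp hx)
    exact List.all_eq_true.mp h x hx'

lemma pvIsWs_eq_wsLine (s : String) : pvIsWs s = pvWsLine s := by
  rw [Bool.eq_iff_iff]
  simp only [pvIsWs, pvWsLine, beq_iff_eq, PySem.Str.strip]
  constructor
  · intro h
    have hl : PySem.Chars.strip s.toList = [] := by
      have := congrArg String.toList h
      simpa using this
    exact (pvStrip_empty_iff _).mp hl
  · intro h
    rw [(pvStrip_empty_iff _).mpr h]

lemma pvNlSpace : ∀ c : Char, (("\n".toList).contains c) = true → PySem.Chars.isspace c = true := by
  intro c h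
  have hm := List.contains_iff_mem.mp h
  rw [show "\n".toList = ['\n'] from rfl] at hm
  fin_cases hm
  rfl

lemma pvWs_stripChars (s : String) : pvIsWs (PySem.Str.stripChars s "\n") = pvIsWs s := by
  rw [pvIsWs_eq_wsLine, pvIsWs_eq_wsLine]
  simp only [pvWsLine, PySem.Str.stripChars, String.toList_ofList, PySem.Chars.stripChars]
  rw [List.all_reverse, pvAll_dropWhile pvNlSpace, List.all_reverse, pvAll_dropWhile pvNlSpace]

lemma pvStripChars_infix_iff {p : Char → Bool} {pat l : List Char}
    (hall : ∀ c ∈ pat, p c = false) :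
    pat <:+: (List.dropWhile p (List.dropWhile p l).reverse).reverse ↔ pat <:+: l := by
  constructor
  · intro h
    refine h.trans ?_
    have h1 := List.dropWhile_suffix (l := (List.dropWhile p l).reverse) p
    have h2 := List.reverse_prefix.mpr h1
    rw [List.reverse_reverse] at h2
    exact h2.isInfix.trans (List.dropWhile_suffix _).isInfix
  · intro h
    have s1 := pvInfix_dropWhile hall h
    have s2 := List.reverse_infix.mpr s1
    have hall' : ∀ c ∈ pat.reverse, p c = false := fun c hc => hall c (List.mem_reverse.mp hc)
    have s3 := pvInfix_dropWhile hall' s2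
    have s4 := List.reverse_infix.mpr s3
    simpa using s4

lemma pvImp_stripChars (s : String) :
    PySem.Str.isIn "import" (PySem.Str.stripChars s "\n") = PySem.Str.isIn "import" s := by
  simp only [PySem.Str.isIn, PySem.Str.stripChars, String.toList_ofList, PySem.Chars.stripChars]
  rw [Bool.eq_iff_iff, PySem.Chars.isIn_iff_infix, PySem.Chars.isIn_iff_infix]
  apply pvStripChars_infix_iff
  intro c hc
  rw [show "import".toList = ['i','m','p','o','r','t'] from rfl] at hc
  fin_cases hc <;> rfl

lemma pvIsWs_proc (strip : Bool) (s : String) : pvIsWs (pvProc strip s) = pvWsLine s := by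
  cases strip
  · exact pvIsWs_eq_wsLine s
  · rw [show pvProc true s = PySem.Str.stripChars s "\n" from rfl, pvWs_stripChars,
      pvIsWs_eq_wsLine]

lemma pvImp_proc (strip : Bool) (s : String) :
    PySem.Str.isIn "import" (pvProc strip s) = pvHasImport s := by
  cases strip
  · rfl
  · rw [show pvProc true s = PySem.Str.stripChars s "\n" from rfl, pvImp_stripChars]
    rfl

lemma pvKeep_proc (strip : Bool) (s : String) :
    pvKeep (pvProc strip s) = (pvHasImport s || pvWsLine s) := by
  simp only [pvKeep, pvImp_proc, pvIsWs_proc]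

-- a line containing 'import' is not a whitespace line
lemma pvImport_not_ws (h : String) (hi : PySem.Str.isIn "import" h = true) : pvIsWs h = false := by
  rw [pvIsWs_eq_wsLine]
  simp only [PySem.Str.isIn] at hi
  rw [PySem.Chars.isIn_iff_infix] at hi
  have hmem : 'i' ∈ h.toList := hi.subset (by rw [show "import".toList = ['i','m','p','o','r','t'] from rfl]; simp)
  simp only [pvWsLine]
  rw [Bool.eq_false_iff]
  intro hall
  have := List.all_eq_true.mp hall 'i' hmem
  cases this

-- dropWhile / takeWhile over appending one element at the end
lemma pvDW_concat_neg {p : String → Bool} {h : String} (l : List String) (hh : p h = false) :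
    (l ++ [h]).dropWhile p = l.dropWhile p ++ [h] := by
  induction l with
  | nil => simp [hh]
  | cons y ys ih => cases hy : p y <;> simp [List.dropWhile_cons, hy, ih]

lemma pvTW_concat_neg {p : String → Bool} {h : String} (l : List String) (hh : p h = false) :
    (l ++ [h]).takeWhile p = l.takeWhile p := by
  induction l with
  | nil => simp [hh]
  | cons y ys ih => cases hy : p y <;> simp [List.takeWhile_cons, hy, ih]

lemma pvDW_concat_pos {p : String → Bool} {h : String} (l : List String) (hh : p h = true) :
    (l ++ [h]).dropWhile p = if l.dropWhile p = [] then [] else l.dropWhile p ++ [h] := by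
  induction l with
  | nil => simp [hh]
  | cons y ys ih =>
    cases hy : p y
    · simp [List.dropWhile_cons, hy]
    · simp [List.dropWhile_cons, hy, ih]

lemma pvTW_concat_pos {p : String → Bool} {h : String} (l : List String) (hh : p h = true) :
    (l ++ [h]).takeWhile p = if l.dropWhile p = [] then l ++ [h] else l.takeWhile p := by
  induction l with
  | nil => simp [hh]
  | cons y ys ih =>
    cases hy : p y
    · simp [List.takeWhile_cons, List.dropWhile_cons, hy]
    · by_cases he : ys.dropWhile p = [] <;>
        simp [List.takeWhile_cons, List.dropWhile_cons, hy, ih, he]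

-- closed form of B's right-to-left fold: imp_r / pend_r split the keep-prefix at its trailing
-- whitespace, asgn_r is the reversed assignment suffix
lemma pvFoldB (strip : Bool) (lines : List String) :
    lines.reverse.foldl (pvStepB strip) ([], [], []) =
      ((((lines.map (pvProc strip)).takeWhile pvKeep).reverse).dropWhile pvIsWs,
       (((lines.map (pvProc strip)).takeWhile pvKeep).reverse).takeWhile pvIsWs,
       ((lines.map (pvProc strip)).dropWhile pvKeep).reverse) := by
  induction lines with
  | nil => simp
  | cons x xs ih =>
    rw [List.reverse_cons, List.foldl_append, ih]
    simp only [List.foldl_cons, List.foldl_nil, List.map_cons]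
    by_cases hi : PySem.Str.isIn "import" (pvProc strip x) = true
    · have hw := pvImport_not_ws _ hi
      have hk : pvKeep (pvProc strip x) = true := by unfold pvKeep; rw [hi, Bool.true_or]
      simp only [pvStepB, hi, if_true, List.takeWhile_cons, List.dropWhile_cons, hk,
        List.reverse_cons, pvDW_concat_neg _ hw, pvTW_concat_neg _ hw]
    · simp only [Bool.not_eq_true] at hi
      by_cases hwx : pvIsWs (pvProc strip x) = true
      · have hk : pvKeep (pvProc strip x) = true := by unfold pvKeep; rw [hi, hwx]; rfl
        simp only [pvStepB, hi, Bool.false_eq_true, if_false, hwx, if_true,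
          List.takeWhile_cons, List.dropWhile_cons, hk, List.reverse_cons,
          pvDW_concat_pos _ hwx, pvTW_concat_pos _ hwx]
        by_cases he : (((xs.map (pvProc strip)).takeWhile pvKeep).reverse).dropWhile pvIsWs = []
        · have hall : (((xs.map (pvProc strip)).takeWhile pvKeep).reverse).takeWhile pvIsWs
              = ((xs.map (pvProc strip)).takeWhile pvKeep).reverse := by
            conv_rhs => rw [← List.takeWhile_append_dropWhile (p := pvIsWs)
              (l := ((xs.map (pvProc strip)).takeWhile pvKeep).reverse)]
            rw [he, List.append_nil]
          rw [he, hall]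
          simp
        · simp [he, List.isEmpty_iff]
      · simp only [Bool.not_eq_true] at hwx
        have hk : pvKeep (pvProc strip x) = false := by unfold pvKeep; rw [hi, hwx]; rfl
        simp only [pvStepB, hi, Bool.false_eq_true, if_false, hwx,
          List.takeWhile_cons, List.dropWhile_cons, hk, List.reverse_cons]
        have key : ((xs.map (pvProc strip)).dropWhile pvKeep).reverse ++
            ((xs.map (pvProc strip)).takeWhile pvKeep).reverse.takeWhile pvIsWs ++
            ((xs.map (pvProc strip)).takeWhile pvKeep).reverse.dropWhile pvIsWs =
            (xs.map (pvProc strip)).reverse := by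
          rw [List.append_assoc, List.takeWhile_append_dropWhile, ← List.reverse_append,
            List.takeWhile_append_dropWhile]
        simp only [Prod.mk.injEq]
        refine ⟨by simp, by simp, ?_⟩
        rw [key]

-- port B in the same closed form as port A's components
lemma pvB_eq (lines : List String) (strip : Bool) :
    split_lines_into_import_and_assignment_py_alt lines strip =
      ((((lines.map (pvProc strip)).takeWhile pvKeep).reverse.dropWhile pvIsWs).reverse,
       (lines.map (pvProc strip)).dropWhile pvKeep) := by
  unfold split_lines_into_import_and_assignment_py_alt
  rw [pvFoldB]
  simp

lemma pvTW_eq (l : List String)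
    (h : pvHasImport ((l.dropWhile pvWsLine).head?.getD "") = false) :
    l.takeWhile (fun s => pvHasImport s || pvWsLine s) = l.takeWhile pvWsLine := by
  induction l with
  | nil => rfl
  | cons x xs ih =>
    cases hw : pvWsLine x
    · simp only [List.dropWhile_cons, hw, Bool.false_eq_true, if_false, List.head?_cons,
        Option.getD_some] at h
      simp [hw, h]
    · simp only [List.dropWhile_cons, hw, if_pos] at h
      simp [hw, ih h]

lemma pvHead_cond (l : List String)
    (hall : ∀ x ∈ l.takeWhile (fun s => pvHasImport s || pvWsLine s), pvWsLine x = true) :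
    pvHasImport ((l.dropWhile pvWsLine).head?.getD "") = false := by
  induction l with
  | nil => rfl
  | cons x xs ih =>
    cases hw : pvWsLine x
    · simp only [List.dropWhile_cons, hw, Bool.false_eq_true, if_false, List.head?_cons,
        Option.getD_some]
      cases hi : pvHasImport x
      · rfl
      · have hx := hall x (by simp [hi])
        rw [hw] at hx
        cases hx
    · simp only [List.dropWhile_cons, hw, if_pos]
      apply ih
      intro y hy
      exact hall y (by simp [hw, hy])

lemma pvD_iff (lines : List String) (strip : Bool) :
    D_split_lines_into_import_and_assignment_py lines strip ↔
      ((lines.map (pvProc strip)).takeWhile pvKeep ≠ [] ∧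
       ∀ x ∈ (lines.map (pvProc strip)).takeWhile pvKeep, pvIsWs x = true) := by
  have hmap : (lines.map (pvProc strip)).takeWhile pvKeep
      = (lines.takeWhile (fun s => pvHasImport s || pvWsLine s)).map (pvProc strip) := by
    rw [List.takeWhile_map]
    have hfun : (pvKeep ∘ pvProc strip) = (fun s => pvHasImport s || pvWsLine s) :=
      funext (fun s => pvKeep_proc strip s)
    rw [hfun]
  unfold D_split_lines_into_import_and_assignment_py
  rw [hmap]
  constructor
  · rintro ⟨hne, hh⟩
    rw [pvTW_eq lines hh]
    refine ⟨by simpa using hne, ?_⟩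
    intro x hx
    rcases List.mem_map.mp hx with ⟨y, hy, rfl⟩
    rw [pvIsWs_proc]
    exact List.mem_takeWhile_imp hy
  · rintro ⟨hne, hall⟩
    have hall' : ∀ y ∈ lines.takeWhile (fun s => pvHasImport s || pvWsLine s), pvWsLine y = true := by
      intro y hy
      have hm := hall (pvProc strip y) (List.mem_map_of_mem hy)
      rwa [pvIsWs_proc] at hm
    have hh := pvHead_cond lines hall'
    refine ⟨?_, hh⟩
    intro hcon
    rw [← pvTW_eq lines hh] at hcon
    exact hne (by simp [hcon])

-- ===== VERDICT (by name: the statement is the Claim_ definition above) =====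
theorem split_lines_into_import_and_assignment_py_spec : Claim_unchanged_split_lines_into_import_and_assignment_py := by
  intro lines strip _dom hD
  rw [pvD_iff] at hD
  rw [pvA_eq, pvB_eq]
  refine Prod.ext ?_ rfl
  apply pvStripEnd_agree
  by_cases hp : (lines.map (pvProc strip)).takeWhile pvKeep = []
  · exact Or.inl hp
  · right
    rcases not_and_or.mp hD with h | h
    · exact absurd hp (by simpa using h)
    · rcases not_forall.mp h with ⟨x, hx⟩
      rcases Classical.not_imp.mp hx with ⟨hmem, hval⟩
      exact ⟨x, hmem, by simpa using hval⟩

theorem split_lines_into_import_and_assignment_py_changed : Claim_changed_split_lines_into_import_and_assignment_py := by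
  unfold Claim_changed_split_lines_into_import_and_assignment_py; decide

theorem split_lines_into_import_and_assignment_py_tight : Claim_exact_split_lines_into_import_and_assignment_py := by
  intro lines strip _dom hD
  rw [pvD_iff] at hD
  obtain ⟨hne, hall⟩ := hD
  rw [pvA_eq, pvB_eq]
  intro hEq
  have h1 := congrArg Prod.fst hEq
  simp only at h1
  have hBnil : (((lines.map (pvProc strip)).takeWhile pvKeep).reverse.dropWhile pvIsWs) = [] := by
    rw [List.dropWhile_eq_nil_iff]
    intro x hx
    exact hall x (List.mem_reverse.mp hx)
  have hAne : pvStripEndA ((lines.map (pvProc strip)).takeWhile pvKeep) ≠ [] := by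
    unfold pvStripEndA
    simp only [hne, if_false]
    have hrne : ((lines.map (pvProc strip)).takeWhile pvKeep).reverse ≠ [] := by
      simpa using hne
    have hlt := pvFindBreak_lt _ hrne
    intro hcon
    rw [List.reverse_eq_nil_iff, List.drop_eq_nil_iff] at hcon
    omega
  rw [h1, hBnil] at hAne
  simp at hAne
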